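-- pv_equiv track=rewrite | github.com/SidddhantJain/Crptography_Lab | ass3.py | path_positions
-- ===== SOURCE A (Python) =====
-- from typing import List, Tuple, Sequence
--
-- def path_positions(rows: int, cols: int, mode: int) -> List[Tuple[int, int]]:
-- 	pos = []
-- 	if mode == 0:  # row-wise
-- 		for r in range(rows):
-- 			for c in range(cols):
-- 				pos.append((r, c))
-- 	elif mode == 1:  # column-wise
-- 		for c in range(cols):
-- 			for r in range(rows):
-- 				pos.append((r, c))
-- 	elif mode == 2:  # spiral (clockwise)
-- 		top, left, bottom, right = 0, 0, rows - 1, cols - 1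
-- 		while top <= bottom and left <= right:
-- 			for c in range(left, right + 1):
-- 				pos.append((top, c))
-- 			top += 1
-- 			for r in range(top, bottom + 1):
-- 				pos.append((r, right))
-- 			right -= 1
-- 			if top <= bottom:
-- 				for c in range(right, left - 1, -1):
-- 					pos.append((bottom, c))
-- 				bottom -= 1
-- 			if left <= right:
-- 				for r in range(bottom, top - 1, -1):
-- 					pos.append((r, left))
-- 				left += 1
-- 	else:  # diagonal zig-zag (like matrix diags)
-- 		for s in range(rows + cols - 1):
-- 			r_start = 0 if s < cols else s - cols + 1
-- 			r_end = min(s, rows - 1)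
-- 			diag = [(r, s - r) for r in range(r_start, r_end + 1) if 0 <= s - r < cols]
-- 			if s % 2 == 0:
-- 				diag.reverse()
-- 			pos.extend(diag)
-- 	return pos
-- ===== SOURCE B (Python) =====
-- from typing import List, Tuple
--
-- def path_positions(rows: int, cols: int, mode: int) -> List[Tuple[int, int]]:
--     if mode == 0:  # row-wise
--         return [(r, c) for r in range(rows) for c in range(cols)]
--     if mode == 1:  # column-wise
--         return [(r, c) for c in range(cols) for r in range(rows)]
--     if mode == 2:  # spiral: direction-vector walk with shrinking segment lengths
--         pos = []
--         if rows > 0 and cols > 0: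
--             r, c = 0, -1
--             dr, dc = 0, 1
--             h, v = cols, rows - 1  # remaining horizontal / vertical segment length
--             while True:
--                 n = h if dc != 0 else v
--                 if n <= 0:
--                     break
--                 for _ in range(n):
--                     r += dr
--                     c += dc
--                     pos.append((r, c))
--                 if dc != 0:
--                     h -= 1
--                 else:
--                     v -= 1
--                 dr, dc = dc, -dr  # turn clockwise
--         return pos
--     # diagonal zig-zag: emit each diagonal directly in its final order
--     pos = []
--     for s in range(rows + cols - 1):
--         if s % 2 == 0:
--             for c in range(max(0, s - rows + 1), min(s, cols - 1) + 1):
--                 pos.append((s - c, c))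
--         else:
--             for r in range(max(0, s - cols + 1), min(s, rows - 1) + 1):
--                 pos.append((r, s - r))
--     return pos
-- ===== Notes on version B (the rewrite author's own statement) =====
-- stated objective: alternative
-- what changed: modes 0/1 become flat comprehensions; the spiral is rewritten as a direction-vector walk (position plus clockwise-turning direction and shrinking segment lengths) instead of four shrinking rectangle bounds; the diagonal mode emits each diagonal directly in its final order with closed-form bounds instead of building, filtering and conditionally reversing a temporary list
import Mathlib
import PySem

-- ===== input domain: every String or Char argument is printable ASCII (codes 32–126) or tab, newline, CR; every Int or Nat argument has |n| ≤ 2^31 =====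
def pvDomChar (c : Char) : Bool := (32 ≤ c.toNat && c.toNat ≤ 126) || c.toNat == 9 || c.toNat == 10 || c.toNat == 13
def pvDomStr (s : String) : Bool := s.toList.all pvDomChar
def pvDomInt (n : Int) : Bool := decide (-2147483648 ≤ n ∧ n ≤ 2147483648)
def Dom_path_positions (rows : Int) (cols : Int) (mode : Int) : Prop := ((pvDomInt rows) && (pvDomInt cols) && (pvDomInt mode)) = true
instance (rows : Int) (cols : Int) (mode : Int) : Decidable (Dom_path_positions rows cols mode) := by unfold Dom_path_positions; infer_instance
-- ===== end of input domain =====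

-- B rewrites the spiral as a direction-vector walk and emits each zig-zag diagonal directly in
-- its final order; equal return value to A on all inputs (objective: alternative, same cost).

-- ===== PORT A =====
def spiralA (top left bottom right : Int) (pos : List (Int × Int)) : List (Int × Int) :=
  if h : top ≤ bottom ∧ left ≤ right then
    let pos1 := (PySem.List.pyRange left (right + 1) 1).foldl (fun p c => p ++ [(top, c)]) pos
    let top1 := top + 1
    let pos2 := (PySem.List.pyRange top1 (bottom + 1) 1).foldl (fun p r => p ++ [(r, right)]) pos1
    let right1 := right - 1
    let pos3 := if top1 ≤ bottom then
        (PySem.List.pyRange right1 (left - 1) (-1)).foldl (fun p c => p ++ [(bottom, c)]) pos2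
      else pos2
    let bottom1 := if top1 ≤ bottom then bottom - 1 else bottom
    let pos4 := if left ≤ right1 then
        (PySem.List.pyRange bottom1 (top1 - 1) (-1)).foldl (fun p r => p ++ [(r, left)]) pos3
      else pos3
    let left1 := if left ≤ right1 then left + 1 else left
    spiralA top1 left1 bottom1 right1 pos4
  else pos
termination_by ((bottom - top) + (right - left) + 2).toNat
decreasing_by split_ifs <;> omega

def path_positions (rows : Int) (cols : Int) (mode : Int) : List (Int × Int) :=
  if mode = 0 then
    (PySem.List.pyRange 0 rows 1).foldl (fun pos r =>
      (PySem.List.pyRange 0 cols 1).foldl (fun pos c => pos ++ [(r, c)]) pos) []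
  else if mode = 1 then
    (PySem.List.pyRange 0 cols 1).foldl (fun pos c =>
      (PySem.List.pyRange 0 rows 1).foldl (fun pos r => pos ++ [(r, c)]) pos) []
  else if mode = 2 then
    spiralA 0 0 (rows - 1) (cols - 1) []
  else
    (PySem.List.pyRange 0 (rows + cols - 1) 1).foldl (fun pos s =>
      let r_start := if s < cols then 0 else s - cols + 1
      let r_end := min s (rows - 1)
      let diag := ((PySem.List.pyRange r_start (r_end + 1) 1).filter
          (fun r => decide (0 ≤ s - r) && decide (s - r < cols))).map (fun r => (r, s - r))
      let diag := if PySem.Int.mod s 2 = 0 then diag.reverse else diag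
      pos ++ diag) []

-- ===== PORT B =====
-- inner 'for _ in range(n)' of B's walk: move n steps in direction (dr, dc), appending each cell
def segB (r c dr dc : Int) : Nat → List (Int × Int) → (Int × Int) × List (Int × Int)
  | 0, pos => ((r, c), pos)
  | Nat.succ n, pos => segB (r + dr) (c + dc) dr dc n (pos ++ [(r + dr, c + dc)])

-- the loop guard re-states n's defining expression so the termination argument can see it
def walkB (r c dr dc h v : Int) (pos : List (Int × Int)) : List (Int × Int) :=
  if hn : (if dc ≠ 0 then h else v) ≤ 0 then pos
  else
    let n := if dc ≠ 0 then h else v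
    let res := segB r c dr dc n.toNat pos
    let h1 := if dc ≠ 0 then h - 1 else h
    let v1 := if dc ≠ 0 then v else v - 1
    walkB res.1.1 res.1.2 dc (-dr) h1 v1 res.2
termination_by h.toNat + v.toNat
decreasing_by split_ifs at * <;> omega

def path_positions_alt (rows : Int) (cols : Int) (mode : Int) : List (Int × Int) :=
  if mode = 0 then
    (PySem.List.pyRange 0 rows 1).flatMap (fun r => (PySem.List.pyRange 0 cols 1).map (fun c => (r, c)))
  else if mode = 1 then
    (PySem.List.pyRange 0 cols 1).flatMap (fun c => (PySem.List.pyRange 0 rows 1).map (fun r => (r, c)))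
  else if mode = 2 then
    if rows > 0 ∧ cols > 0 then walkB 0 (-1) 0 1 cols (rows - 1) [] else []
  else
    (PySem.List.pyRange 0 (rows + cols - 1) 1).foldl (fun pos s =>
      if PySem.Int.mod s 2 = 0 then
        pos ++ (PySem.List.pyRange (max 0 (s - rows + 1)) (min s (cols - 1) + 1) 1).map (fun c => (s - c, c))
      else
        pos ++ (PySem.List.pyRange (max 0 (s - cols + 1)) (min s (rows - 1) + 1) 1).map (fun r => (r, s - r))) []

-- ===== PRECONDITION & SPEC =====
def Spec_path_positions (rows : Int) (cols : Int) (mode : Int) (out : List (Int × Int)) : Prop := out = path_positions_alt rows cols mode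
instance (rows : Int) (cols : Int) (mode : Int) (out : List (Int × Int)) : Decidable (Spec_path_positions rows cols mode out) := by unfold Spec_path_positions; infer_instance

-- ===== CLAIM (what is proved, stated in full; the proofs are below) =====
def Claim_equal_path_positions : Prop := ∀ (rows : Int) (cols : Int) (mode : Int), Dom_path_positions rows cols mode → Spec_path_positions rows cols mode (path_positions rows cols mode)

-- ===== LEMMAS AND PROOFS =====

theorem segB_eq (dr dc : Int) : ∀ (n : Nat) (r c : Int) (pos : List (Int × Int)),
    segB r c dr dc n pos =
      ((r + n * dr, c + n * dc),
        pos ++ (List.range n).map (fun (k : Nat) => (r + ((k : Int) + 1) * dr, c + ((k : Int) + 1) * dc)))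
  | 0, r, c, pos => by simp [segB]
  | Nat.succ n, r, c, pos => by
    rw [segB, segB_eq dr dc n (r + dr) (c + dc)]
    simp only [Prod.mk.injEq]
    refine ⟨⟨by push_cast; ring, by push_cast; ring⟩, ?_⟩
    rw [List.append_assoc, List.singleton_append, List.range_succ_eq_map, List.map_cons,
      List.map_map]
    refine congrArg (pos ++ ·) (congrArg₂ List.cons ?_ ?_)
    · simp only [Prod.mk.injEq]; constructor <;> push_cast <;> ring
    · refine List.map_congr_left (fun k _ => ?_)
      simp only [Function.comp_apply, Prod.mk.injEq]
      constructor <;> push_cast <;> ring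

theorem walkB_h_stop (r c dr dc h v : Int) (pos : List (Int × Int)) (hdc : dc ≠ 0)
    (hh : h ≤ 0) : walkB r c dr dc h v pos = pos := by
  rw [walkB.eq_def]; simp [hdc, hh]

theorem walkB_v_stop (r c dr dc h v : Int) (pos : List (Int × Int)) (hdc : dc = 0)
    (hv : v ≤ 0) : walkB r c dr dc h v pos = pos := by
  rw [walkB.eq_def]; simp [hdc, hv]

theorem walkB_h_step (r c dr dc v : Int) (n : Nat) (pos : List (Int × Int)) (hdc : dc ≠ 0)
    (hn : 0 < n) :
    walkB r c dr dc (n : Int) v pos =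
      walkB (r + n * dr) (c + n * dc) dc (-dr) ((n : Int) - 1) v
        (pos ++ (List.range n).map (fun (k : Nat) => (r + ((k : Int) + 1) * dr, c + ((k : Int) + 1) * dc))) := by
  rw [walkB.eq_def]
  have h0 : ¬((n : Int) ≤ 0) := by omega
  have h0' : ¬(n = 0) := by omega
  simp [hdc, h0, h0', segB_eq]

theorem walkB_v_step (r c dr h : Int) (n : Nat) (pos : List (Int × Int)) (hn : 0 < n) :
    walkB r c dr 0 h (n : Int) pos =
      walkB (r + n * dr) c 0 (-dr) h ((n : Int) - 1)
        (pos ++ (List.range n).map (fun (k : Nat) => (r + ((k : Int) + 1) * dr, c))) := by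
  rw [walkB.eq_def]
  have h0 : ¬((n : Int) ≤ 0) := by omega
  have h0' : ¬(n = 0) := by omega
  simp [h0, h0', segB_eq]

theorem spiralA_stop (top left bottom right : Int) (pos : List (Int × Int))
    (h : ¬(top ≤ bottom ∧ left ≤ right)) : spiralA top left bottom right pos = pos := by
  rw [spiralA.eq_def, dif_neg h]

theorem spiralA_step (top left bottom right : Int) (pos : List (Int × Int))
    (h1 : top ≤ bottom) (h2 : left ≤ right) :
    spiralA top left bottom right pos =
      spiralA (top + 1) (if left ≤ right - 1 then left + 1 else left)
        (if top + 1 ≤ bottom then bottom - 1 else bottom) (right - 1)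
        ((((pos ++ (PySem.List.pyRange left (right + 1) 1).map (fun c => (top, c)))
            ++ (PySem.List.pyRange (top + 1) (bottom + 1) 1).map (fun r => (r, right)))
            ++ (if top + 1 ≤ bottom then
                  (PySem.List.pyRange (right - 1) (left - 1) (-1)).map (fun c => (bottom, c))
                else []))
            ++ (if left ≤ right - 1 then
                  (PySem.List.pyRange (if top + 1 ≤ bottom then bottom - 1 else bottom)
                    (top + 1 - 1) (-1)).map (fun r => (r, left))
                else [])) := by
  rw [spiralA.eq_def, dif_pos ⟨h1, h2⟩]
  simp only [PySem.List.foldl_append_singleton_eq_map]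
  split_ifs <;> simp [List.append_assoc]

-- the heart of the equivalence: B's direction-vector walk traces exactly A's rectangle
-- peeling; starting at (r, c) the walk covers the rectangle with corners (r, c+1) and
-- (r + V, c + H)
theorem walk_spiral (M : Nat) : ∀ (H V : Nat) (r c : Int) (pos : List (Int × Int)),
    H + V ≤ M →
    walkB r c 0 1 (H : Int) (V : Int) pos = spiralA r (c + 1) (r + (V : Int)) (c + (H : Int)) pos := by
  induction M with
  | zero =>
    intro H V r c pos hM
    rw [walkB_h_stop r c 0 1 (H : Int) (V : Int) pos (by norm_num) (by omega),
      spiralA_stop r (c + 1) (r + (V : Int)) (c + (H : Int)) pos (by omega)]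
  | succ M ih =>
    intro H V r c pos hM
    by_cases hH0 : H = 0
    · rw [walkB_h_stop r c 0 1 (H : Int) (V : Int) pos (by norm_num) (by omega),
        spiralA_stop r (c + 1) (r + (V : Int)) (c + (H : Int)) pos (by omega)]
    · have hH1 : 1 ≤ H := Nat.one_le_iff_ne_zero.mpr hH0
      rw [spiralA_step r (c + 1) (r + (V : Int)) (c + (H : Int)) pos (by omega) (by omega)]
      rw [walkB_h_step r c 0 1 (V : Int) H pos (by norm_num) (by omega)]
      simp only [mul_zero, mul_one, add_zero, neg_zero]
      have e1 : List.map (fun (k : Nat) => (r, c + ((k : Int) + 1))) (List.range H)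
          = List.map (fun c' => (r, c')) (PySem.List.pyRange (c + 1) (c + (H : Int) + 1) 1) := by
        rw [PySem.List.pyRange_one, List.map_map]
        apply List.ext_getElem
        · simp only [List.length_map, List.length_range]; omega
        · intro i hi1 hi2
          simp only [List.getElem_map, List.getElem_range, Function.comp_apply, Prod.mk.injEq,
            true_and, and_true]
          first | trivial | omega | (constructor <;> omega)
      by_cases hV0 : V = 0
      · -- A's remaining three segments are empty and B's walk stops (v = 0)
        rw [walkB_v_stop _ _ _ _ _ _ _ rfl (by omega : (V : Int) ≤ 0)]
        have h3 : ¬(r + 1 ≤ r + (V : Int)) := by omega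
        simp only [if_neg h3]
        rw [PySem.List.pyRange_one_eq_nil (by omega : r + (V : Int) + 1 ≤ r + 1),
          PySem.List.pyRange_neg_one_eq_nil (by omega : r + (V : Int) ≤ r + 1 - 1)]
        simp only [List.map_nil, List.append_nil, ite_self]
        rw [spiralA_stop (r + 1) (if c + 1 ≤ c + (H : Int) - 1 then c + 1 + 1 else c + 1)
          (r + (V : Int)) (c + (H : Int) - 1) _ (by omega)]
        rw [e1]
      · have hV1 : 1 ≤ V := Nat.one_le_iff_ne_zero.mpr hV0
        have h3 : r + 1 ≤ r + (V : Int) := by omega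
        simp only [if_pos h3]
        rw [walkB_v_step r (c + (H : Int)) 1 ((H : Int) - 1) V _ (by omega)]
        simp only [mul_one]
        have e2 : List.map (fun (k : Nat) => (r + ((k : Int) + 1), c + (H : Int))) (List.range V)
            = List.map (fun r' => (r', c + (H : Int)))
                (PySem.List.pyRange (r + 1) (r + (V : Int) + 1) 1) := by
          rw [PySem.List.pyRange_one, List.map_map]
          apply List.ext_getElem
          · simp only [List.length_map, List.length_range]; omega
          · intro i hi1 hi2
            simp only [List.getElem_map, List.getElem_range, Function.comp_apply, Prod.mk.injEq,
              true_and, and_true]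
            first | trivial | omega | (constructor <;> omega)
        by_cases hH2 : H = 1
        · -- width 1: bottom row and left column are empty and B's walk stops (h = 0)
          rw [walkB_h_stop (r + (V : Int)) (c + (H : Int)) 0 (-1) ((H : Int) - 1)
            ((V : Int) - 1) _ (by norm_num) (by omega : (H : Int) - 1 ≤ 0)]
          have h4 : ¬(c + 1 ≤ c + (H : Int) - 1) := by omega
          simp only [if_neg h4]
          rw [PySem.List.pyRange_neg_one_eq_nil (by omega : c + (H : Int) - 1 ≤ c + 1 - 1)]
          simp only [List.map_nil, List.append_nil]
          rw [spiralA_stop (r + 1) (c + 1) (r + (V : Int) - 1) (c + (H : Int) - 1) _ (by omega)]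
          rw [e1, e2]
        · have hH2' : 2 ≤ H := by omega
          have h4 : c + 1 ≤ c + (H : Int) - 1 := by omega
          simp only [if_pos h4]
          rw [show ((H : Int) - 1) = ((H - 1 : Nat) : Int) from by omega]
          rw [walkB_h_step (r + (V : Int)) (c + (H : Int)) 0 (-1) ((V : Int) - 1) (H - 1) _
            (by norm_num) (by omega)]
          simp only [mul_zero, add_zero, mul_neg_one, neg_zero]
          have e3 : List.map (fun (k : Nat) => (r + (V : Int), c + (H : Int) + -((k : Int) + 1)))
                (List.range (H - 1))
              = List.map (fun c' => (r + (V : Int), c'))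
                  (PySem.List.pyRange (c + (H : Int) - 1) (c + 1 - 1) (-1)) := by
            rw [PySem.List.pyRange_neg_one, List.map_map]
            apply List.ext_getElem
            · simp only [List.length_map, List.length_range]; omega
            · intro i hi1 hi2
              simp only [List.getElem_map, List.getElem_range, Function.comp_apply, Prod.mk.injEq,
                true_and, and_true]
              first | trivial | omega | (constructor <;> omega)
          by_cases hV2 : V = 1
          · -- height 1 remains: left column is empty and B's walk stops (v = 0)
            rw [walkB_v_stop _ _ _ _ _ _ _ rfl (by omega : (V : Int) - 1 ≤ 0)]
            rw [PySem.List.pyRange_neg_one_eq_nil (by omega : r + (V : Int) - 1 ≤ r + 1 - 1)]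
            simp only [List.map_nil, List.append_nil]
            rw [spiralA_stop (r + 1) (c + 1 + 1) (r + (V : Int) - 1) (c + (H : Int) - 1) _
              (by omega)]
            rw [e1, e2, e3]
          · have hV2' : 2 ≤ V := by omega
            rw [show ((V : Int) - 1) = ((V - 1 : Nat) : Int) from by omega]
            rw [show ((H - 1 : Nat) : Int) - 1 = ((H - 2 : Nat) : Int) from by omega]
            rw [walkB_v_step (r + (V : Int)) (c + (H : Int) + -((H - 1 : Nat) : Int)) (-1)
              ((H - 2 : Nat) : Int) (V - 1) _ (by omega)]
            simp only [mul_neg_one, neg_neg]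
            have e4 : List.map (fun (k : Nat) => (r + (V : Int) + -((k : Int) + 1), c + 1))
                  (List.range (V - 1))
                = List.map (fun r' => (r', c + 1))
                    (PySem.List.pyRange (r + (V : Int) - 1) (r + 1 - 1) (-1)) := by
              rw [PySem.List.pyRange_neg_one, List.map_map]
              apply List.ext_getElem
              · simp only [List.length_map, List.length_range]; omega
              · intro i hi1 hi2
                simp only [List.getElem_map, List.getElem_range, Function.comp_apply,
                  Prod.mk.injEq, true_and, and_true]
                first | trivial | omega | (constructor <;> omega)
            rw [show ((V - 1 : Nat) : Int) - 1 = ((V - 2 : Nat) : Int) from by omega]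
            rw [show r + (V : Int) + -((V - 1 : Nat) : Int) = r + 1 from by omega,
              show c + (H : Int) + -((H - 1 : Nat) : Int) = c + 1 from by omega]
            rw [ih (H - 2) (V - 2) (r + 1) (c + 1) _ (by omega)]
            rw [show r + 1 + ((V - 2 : Nat) : Int) = r + (V : Int) - 1 from by omega,
              show c + 1 + ((H - 2 : Nat) : Int) = c + (H : Int) - 1 from by omega]
            rw [e1, e2, e3, e4]

theorem mode2_eq (rows cols : Int) :
    spiralA 0 0 (rows - 1) (cols - 1) []
      = (if rows > 0 ∧ cols > 0 then walkB 0 (-1) 0 1 cols (rows - 1) [] else []) := by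
  by_cases h : rows > 0 ∧ cols > 0
  · rw [if_pos h]
    have e := walk_spiral (cols.toNat + (rows - 1).toNat) cols.toNat (rows - 1).toNat 0 (-1) []
      (le_refl _)
    rw [show ((cols.toNat : Nat) : Int) = cols from by omega,
      show (((rows - 1).toNat : Nat) : Int) = rows - 1 from by omega,
      show ((-1 : Int) + 1) = 0 from by norm_num,
      show ((0 : Int) + (rows - 1)) = rows - 1 from by omega,
      show ((-1 : Int) + cols) = cols - 1 from by omega] at e
    exact e.symm
  · rw [if_neg h, spiralA_stop 0 0 (rows - 1) (cols - 1) [] (by omega)]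

-- the comprehension filter in A's diagonal never removes anything
theorem diag_filter (rows cols s : Int) :
    (PySem.List.pyRange (if s < cols then 0 else s - cols + 1) (min s (rows - 1) + 1) 1).filter
        (fun r => decide (0 ≤ s - r) && decide (s - r < cols))
      = PySem.List.pyRange (if s < cols then 0 else s - cols + 1) (min s (rows - 1) + 1) 1 := by
  apply List.filter_eq_self.mpr
  intro r hr
  rw [PySem.List.mem_pyRange_one] at hr
  simp only [Bool.and_eq_true, decide_eq_true_eq]
  split_ifs at hr <;> omega

theorem diag_odd (rows cols s : Int) :
    (PySem.List.pyRange (if s < cols then 0 else s - cols + 1) (min s (rows - 1) + 1) 1).map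
        (fun r => (r, s - r))
      = (PySem.List.pyRange (max 0 (s - cols + 1)) (min s (rows - 1) + 1) 1).map
          (fun r => (r, s - r)) := by
  have hst : (if s < cols then 0 else s - cols + 1) = max 0 (s - cols + 1) := by
    split_ifs <;> omega
  rw [hst]

theorem diag_even (rows cols s : Int) :
    ((PySem.List.pyRange (if s < cols then 0 else s - cols + 1) (min s (rows - 1) + 1) 1).map
        (fun r => (r, s - r))).reverse
      = (PySem.List.pyRange (max 0 (s - rows + 1)) (min s (cols - 1) + 1) 1).map
          (fun c => (s - c, c)) := by
  rw [PySem.List.pyRange_one, PySem.List.pyRange_one]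
  apply List.ext_getElem
  · simp only [List.length_reverse, List.length_map, List.length_range]
    split_ifs <;> omega
  · intro i hi1 hi2
    simp only [List.length_reverse, List.length_map, List.length_range] at hi1
    simp only [List.getElem_reverse, List.getElem_map, List.getElem_range, List.length_map,
      List.length_range, Prod.mk.injEq]
    constructor <;> split_ifs at * <;> omega

theorem mode3_eq (rows cols : Int) :
    (PySem.List.pyRange 0 (rows + cols - 1) 1).foldl (fun pos s =>
        let r_start := if s < cols then 0 else s - cols + 1
        let r_end := min s (rows - 1)
        let diag := ((PySem.List.pyRange r_start (r_end + 1) 1).filter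
            (fun r => decide (0 ≤ s - r) && decide (s - r < cols))).map (fun r => (r, s - r))
        let diag := if PySem.Int.mod s 2 = 0 then diag.reverse else diag
        pos ++ diag) []
      = (PySem.List.pyRange 0 (rows + cols - 1) 1).foldl (fun pos s =>
          if PySem.Int.mod s 2 = 0 then
            pos ++ (PySem.List.pyRange (max 0 (s - rows + 1)) (min s (cols - 1) + 1) 1).map
              (fun c => (s - c, c))
          else
            pos ++ (PySem.List.pyRange (max 0 (s - cols + 1)) (min s (rows - 1) + 1) 1).map
              (fun r => (r, s - r))) [] := by
  apply PySem.List.foldl_congr_mem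
  intro pos s _
  simp only []
  rw [diag_filter rows cols s]
  by_cases hm : PySem.Int.mod s 2 = 0
  · rw [if_pos hm, if_pos hm, diag_even rows cols s]
  · rw [if_neg hm, if_neg hm, diag_odd rows cols s]

-- ===== VERDICT (by name: the statement is the Claim_ definition above) =====
theorem path_positions_spec : Claim_equal_path_positions := by
  intro rows cols mode _hdom
  unfold Spec_path_positions path_positions path_positions_alt
  by_cases h0 : mode = 0
  · simp only [if_pos h0]
    simp only [PySem.List.foldl_append_singleton_eq_map]
    rw [PySem.List.foldl_append_eq_flatMap]
    simp
  · simp only [if_neg h0]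
    by_cases h1 : mode = 1
    · simp only [if_pos h1]
      simp only [PySem.List.foldl_append_singleton_eq_map]
      rw [PySem.List.foldl_append_eq_flatMap]
      simp
    · simp only [if_neg h1]
      by_cases h2 : mode = 2
      · simp only [if_pos h2]
        exact mode2_eq rows cols
      · simp only [if_neg h2]
        exact mode3_eq rows cols
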